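-- pv_equiv track=rewrite | github.com/LeeJoEun-01/coding-test | 프로그래머스/3/258709. 주사위 고르기/주사위 고르기.py | solution
-- ===== SOURCE A (Python) =====
-- import itertools
-- import bisect
--
-- def solution(dice):
--     answer = []
--     len_dice = len(dice)
--     candidates = list(itertools.combinations(range(len_dice), len_dice//2))
--     max_cnt = 0
--
--     # 주사위 선정
--     for candi in candidates:
--         A = list(candi)
--         B = [b for b in range(len_dice) if b not in candi]
--
--         # 주사위로 나올 수 있는 값 정리
--         A_dice_list = [dice[i] for i in A]
--         A_sums = [sum(combination) for combination in itertools.product(*A_dice_list)]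
--
--         B_dice_list = [dice[i] for i in B]
--         B_sums = [sum(combination) for combination in itertools.product(*B_dice_list)]
--
--         cnt = 0
--         B_sums.sort()
--         for a in A_sums:
--             cnt += bisect.bisect_left(B_sums,a)
--
--         if max_cnt < cnt:
--             max_cnt = cnt
--             answer = [a+1 for a in A]
--
--     return answer
-- ===== SOURCE B (Python) =====
-- import itertools
-- import bisect
--
-- def _conv(h, faces):
--     new = {}
--     for s, c in h.items():
--         for f in faces:
--             new[s + f] = new.get(s + f, 0) + c
--     return new
--
-- def solution(dice):
--     n = len(dice)
--     answer = []
--     max_cnt = 0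
--     for candi in itertools.combinations(range(n), n // 2):
--         sel = set(candi)
--         ha = {0: 1}
--         hb = {0: 1}
--         for i in range(n):
--             faces = dice[i]
--             if i in sel:
--                 ha = _conv(ha, faces)
--             else:
--                 hb = _conv(hb, faces)
--         items_b = sorted(hb.items(), key=lambda kv: kv[0])
--         keys_b = [kv[0] for kv in items_b]
--         prefix = [0]
--         total = 0
--         for kv in items_b:
--             total += kv[1]
--             prefix.append(total)
--         cnt = 0
--         for a, ca in ha.items():
--             cnt += ca * prefix[bisect.bisect_left(keys_b, a)]
--         if max_cnt < cnt:
--             max_cnt = cnt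
--             answer = [i + 1 for i in candi]
--     return answer
-- ===== Notes on version B (the rewrite author's own statement) =====
-- stated objective: alternative
-- what changed: Per partition, instead of enumerating every face combination with itertools.product and bisecting each A-sum into the sorted list of all B-sums, B folds each die into a value->frequency histogram dict (a convolution starting from {0:1}) and counts wins as sum(ca * prefix[bisect_left(keys_b, a)]) over the A-histogram items using one prefix-sum array over the sorted B-histogram items; the cost depends on the number of distinct sums instead of the number of face combinations.
import Mathlib
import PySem

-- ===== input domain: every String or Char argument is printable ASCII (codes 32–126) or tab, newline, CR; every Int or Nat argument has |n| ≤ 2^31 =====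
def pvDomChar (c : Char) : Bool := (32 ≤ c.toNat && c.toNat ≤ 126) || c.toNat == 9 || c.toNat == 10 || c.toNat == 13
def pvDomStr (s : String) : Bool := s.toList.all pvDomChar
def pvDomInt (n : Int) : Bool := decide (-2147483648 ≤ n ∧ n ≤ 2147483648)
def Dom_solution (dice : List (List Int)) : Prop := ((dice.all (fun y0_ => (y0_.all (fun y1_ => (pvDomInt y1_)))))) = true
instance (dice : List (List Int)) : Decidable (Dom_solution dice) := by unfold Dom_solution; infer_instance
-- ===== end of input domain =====

-- B replaces A's itertools.product sum enumeration + per-sum bisect by per-die histogram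
-- convolution dicts and a prefix-sum lookup over the sorted B-histogram (alternative algorithm, same results).


-- ===== PORT A =====
-- itertools.product(*lists) as lists of one pick per input list, in Python's order (leftmost varies slowest)
def pvProd : List (List Int) → List (List Int)
  | [] => [[]]
  | l :: ls => l.flatMap (fun x => (pvProd ls).map (fun t => x :: t))

-- literal port of A; len(dice)//2 is passed to combinations via .toNat (len ≥ 0, exact);
-- dice[i] is ported as pyGetD with default [] (every index taken comes from range(len(dice)), so in range, exact)
def solution (dice : List (List Int)) : List Int :=
  let lenDice : Int := PySem.List.len dice
  let candidates := PySem.List.combinations (PySem.List.pyRange 0 lenDice 1) (PySem.Int.floordiv lenDice 2).toNat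
  let st := candidates.foldl (fun (st : List Int × Int) candi =>
    let A := candi
    let B := (PySem.List.pyRange 0 lenDice 1).filter (fun b => !(candi.contains b))
    let ADiceList := A.map (fun i => PySem.List.pyGetD dice i [])
    let ASums := (pvProd ADiceList).map (fun c => c.sum)
    let BDiceList := B.map (fun i => PySem.List.pyGetD dice i [])
    let BSums := (pvProd BDiceList).map (fun c => c.sum)
    let BSorted := PySem.List.sorted BSums (fun x => x) false
    let cnt := ASums.foldl (fun c a => c + ((PySem.List.bisectLeft BSorted a : Nat) : Int)) 0
    if st.2 < cnt then (A.map (fun a => a + 1), cnt) else st) ([], 0)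
  st.1

-- ===== PORT B =====
-- histogram convolution: fold one die's faces into a sum->frequency dict (Source B's _conv)
def pvConv (h : PySem.Dict Int Int) (faces : List Int) : PySem.Dict Int Int :=
  h.items.foldl (fun new p =>
    faces.foldl (fun new f => new.insert (p.1 + f) (new.getD (p.1 + f) 0 + p.2)) new) PySem.Dict.empty

-- literal port of B (Source B); prefix[j] with j = bisect_left result is ported as pyGetD (j always in range, exact)
def solution_alt (dice : List (List Int)) : List Int :=
  let n : Int := PySem.List.len dice
  let st := (PySem.List.combinations (PySem.List.pyRange 0 n 1) (PySem.Int.floordiv n 2).toNat).foldl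
    (fun (st : List Int × Int) candi =>
      let sel : PySem.Set Int := PySem.Set.ofList candi
      let h0 : PySem.Dict Int Int := PySem.Dict.empty.insert 0 1
      let hab := (PySem.List.pyRange 0 n 1).foldl
        (fun (hab : PySem.Dict Int Int × PySem.Dict Int Int) i =>
          let faces := PySem.List.pyGetD dice i []
          if PySem.Set.contains sel i then (pvConv hab.1 faces, hab.2)
          else (hab.1, pvConv hab.2 faces)) (h0, h0)
      let itemsB := PySem.List.sorted hab.2.items (fun kv => kv.1) false
      let keysB := itemsB.map (fun kv => kv.1)
      let pr := itemsB.foldl (fun (pt : List Int × Int) kv =>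
        (pt.1 ++ [pt.2 + kv.2], pt.2 + kv.2)) ([0], 0)
      let cnt := hab.1.items.foldl (fun c kv =>
        c + kv.2 * PySem.List.pyGetD pr.1 ((PySem.List.bisectLeft keysB kv.1 : Nat) : Int) 0) 0
      if st.2 < cnt then (candi.map (fun i => i + 1), cnt) else st) ([], 0)
  st.1

-- ===== PRECONDITION & SPEC =====
def Spec_solution (dice : List (List Int)) (out : List Int) : Prop := out = solution_alt dice
instance (dice : List (List Int)) (out : List Int) : Decidable (Spec_solution dice out) := by unfold Spec_solution; infer_instance

-- ===== CLAIM (what is proved, stated in full; the proofs are below) =====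
def Claim_equal_solution : Prop := ∀ (dice : List (List Int)), Dom_solution dice → Spec_solution dice (solution dice)

-- ===== LEMMAS AND PROOFS =====


theorem pv_delta_sum (K : List Int) (g : Int → Int) (y : Int) (hK : K.Nodup) (hy : y ∈ K) :
    (K.map (fun k => if k = y then g k else 0)).sum = g y := by
  induction K with
  | nil => cases hy
  | cons k t ih =>
      have hnd := List.nodup_cons.mp hK
      rcases List.mem_cons.mp hy with h | h
      · subst h
        have hmap : (t.map (fun k' => if k' = y then g k' else 0)) = t.map (fun _ => (0:Int)) := by
          apply List.map_congr_left
          intro x hx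
          have hne : x ≠ y := fun hxk => hnd.1 (hxk ▸ hx)
          simp [hne]
        simp [hmap]
      · have hk : k ≠ y := fun hk => hnd.1 (hk ▸ h)
        simp [hk, ih hnd.2 h]

theorem pv_wsum (K ys : List Int) (g : Int → Int) (hK : K.Nodup) (hsub : ∀ y ∈ ys, y ∈ K) :
    (K.map (fun k => (ys.count k : Int) * g k)).sum = (ys.map g).sum := by
  induction ys with
  | nil => simp
  | cons y t ih =>
      have h1 : (K.map (fun k => ((y :: t).count k : Int) * g k))
          = K.map (fun k => (t.count k : Int) * g k + (if k = y then g k else 0)) := by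
        apply List.map_congr_left
        intro k _
        by_cases h : k = y
        · subst h; simp; ring
        · simp [h, Ne.symm h]
      rw [h1, PySem.List.sum_map_add_int, ih (fun z hz => hsub z (List.mem_cons_of_mem _ hz)),
        pv_delta_sum K g y hK (hsub y List.mem_cons_self)]
      simp [add_comm]


theorem pv_count_map_add (l : List Int) (y v : Int) : (l.map (fun f => y + f)).count v = l.count (v - y) := by
  induction l with
  | nil => simp
  | cons x t ih =>
      simp only [List.map_cons, List.count_cons, ih]
      by_cases h : y + x = v
      · have h2 : x = v - y := by omega
        simp [h2]
      · have h2 : ¬ (x = v - y) := by omega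
        simp [h, h2]

theorem pv_sum_flatMap (ys : List Int) (g : Int → List Int) (F : Int → Nat) :
    ((ys.flatMap g).map F).sum = (ys.map (fun y => ((g y).map F).sum)).sum := by
  induction ys with
  | nil => simp
  | cons y t ih => simp [List.flatMap_cons, ih]

theorem pv_sums_cons (l : List Int) (ls : List (List Int)) :
    ((pvProd (l :: ls)).map (fun c => c.sum)) = l.flatMap (fun x => ((pvProd ls).map (fun c => c.sum)).map (fun s => x + s)) := by
  simp only [pvProd, List.map_flatMap]
  apply congrArg List.flatten
  apply List.map_congr_left
  intro x _
  simp [List.map_map, Function.comp]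

theorem pv_count_scons (l : List Int) (ls : List (List Int)) (w : Int) :
    ((pvProd (l :: ls)).map (fun c => c.sum)).count w
      = (l.map (fun x => ((pvProd ls).map (fun c => c.sum)).count (w - x))).sum := by
  rw [pv_sums_cons]
  induction l with
  | nil => simp
  | cons x t ih =>
      simp only [List.flatMap_cons, List.count_append, List.map_cons, List.sum_cons]
      rw [pv_count_map_add, ih]

def pvIter (ys : List Int) (ls : List (List Int)) : List Int :=
  ls.foldl (fun ys l => ys.flatMap (fun y => l.map (fun f => y + f))) ys

theorem pv_iter_nil_count (ys : List Int) (v : Int) :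
    ys.count v = (ys.map (fun y => ((pvProd []).map (fun c => c.sum)).count (v - y))).sum := by
  induction ys with
  | nil => simp
  | cons y t ih =>
      simp only [List.count_cons, List.map_cons, List.sum_cons, ih]
      by_cases h : y = v
      · subst h
        simp [pvProd, sub_self]
        omega
      · have h2 : ¬ (0 = v - y) := by omega
        simp [pvProd, h, h2, List.count_singleton]

theorem pv_iter_count : ∀ (ls : List (List Int)) (ys : List Int) (v : Int),
    (pvIter ys ls).count v = (ys.map (fun y => ((pvProd ls).map (fun c => c.sum)).count (v - y))).sum := by
  intro ls
  induction ls with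
  | nil =>
      intro ys v
      simpa [pvIter] using pv_iter_nil_count ys v
  | cons l ls ih =>
      intro ys v
      have hstep : pvIter ys (l :: ls) = pvIter (ys.flatMap (fun y => l.map (fun f => y + f))) ls := by
        simp [pvIter]
      rw [hstep, ih,
        pv_sum_flatMap ys (fun y => (l.map (fun f => y + f)))
          (fun z => ((pvProd ls).map (fun c => c.sum)).count (v - z))]
      apply congrArg
      apply List.map_congr_left
      intro y _
      rw [pv_count_scons, List.map_map]
      apply congrArg
      apply List.map_congr_left
      intro f _
      simp only [Function.comp]
      congr 1
      omega


-- one face-loop of pvConv adds c at shifted keys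
theorem pv_getD_addLoop (l : List Int) (d : PySem.Dict Int Int) (s c v : Int) :
    (l.foldl (fun d f => d.insert (s + f) (d.getD (s + f) 0 + c)) d).getD v 0
      = d.getD v 0 + c * (l.count (v - s) : Int) := by
  induction l generalizing d with
  | nil => simp
  | cons f t ih =>
      rw [List.foldl_cons, ih, PySem.Dict.getD_insert]
      by_cases h : v = s + f
      · have h2 : (v - s) = f := by omega
        rw [if_pos h, List.count_cons, h2, h]
        simp
        ring
      · have h2 : ¬ ((v - s) = f) := by omega
        rw [if_neg h, List.count_cons]
        simp
        left
        omega

theorem pv_getD_conv (h : PySem.Dict Int Int) (faces : List Int) (v : Int) :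
    (pvConv h faces).getD v 0 = (h.items.map (fun p => p.2 * (faces.count (v - p.1) : Int))).sum := by
  unfold pvConv
  generalize h.items = items
  suffices H : ∀ (items : List (Int × Int)) (d : PySem.Dict Int Int),
      (items.foldl (fun new p => faces.foldl (fun new f => new.insert (p.1 + f) (new.getD (p.1 + f) 0 + p.2)) new) d).getD v 0
        = d.getD v 0 + (items.map (fun p => p.2 * (faces.count (v - p.1) : Int))).sum by
    rw [H items PySem.Dict.empty]; simp
  intro items
  induction items with
  | nil => simp
  | cons p t ih =>
      intro d
      rw [List.foldl_cons, ih, pv_getD_addLoop]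
      simp [add_assoc]

theorem pv_keys_conv (h : PySem.Dict Int Int) (faces : List Int) :
    (pvConv h faces).keys = PySem.Set.ofList (h.items.flatMap (fun p => faces.map (fun f => p.1 + f))) := by
  unfold pvConv
  suffices H : ∀ (items : List (Int × Int)) (d : PySem.Dict Int Int),
      (items.foldl (fun new p => faces.foldl (fun new f => new.insert (p.1 + f) (new.getD (p.1 + f) 0 + p.2)) new) d).keys
        = PySem.Set.update d.keys (items.flatMap (fun p => faces.map (fun f => p.1 + f))) by
    rw [H h.items PySem.Dict.empty]
    rfl
  intro items
  induction items with
  | nil => intro d; simp [PySem.Set.update]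
  | cons p t ih =>
      intro d
      rw [List.foldl_cons, ih, List.flatMap_cons, PySem.Set.update_append,
        PySem.Dict.keys_foldl_insert_key faces (fun f => p.1 + f) (fun d f => d.getD (p.1 + f) 0 + p.2) d]

theorem pv_bisect_countP (xs : List Int) (a : Int) (hs : xs.Pairwise (· ≤ ·)) :
    PySem.List.bisectLeft xs a = xs.countP (fun y => decide (y < a)) := by
  obtain ⟨hle, hlt, hge⟩ := PySem.List.bisectLeft_spec xs a hs
  set k := PySem.List.bisectLeft xs a with hk
  have hsplit : xs.countP (fun y => decide (y < a))
      = (xs.take k).countP (fun y => decide (y < a)) + (xs.drop k).countP (fun y => decide (y < a)) := by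
    rw [← List.countP_append, List.take_append_drop]
  have h1 : (xs.take k).countP (fun y => decide (y < a)) = (xs.take k).length := by
    rw [List.countP_eq_length]
    intro y hy
    rcases List.mem_take_iff_getElem.mp hy with ⟨j, hj, rfl⟩
    have hjk : j < k := lt_of_lt_of_le hj (min_le_left _ _)
    have hjl : j < xs.length := lt_of_lt_of_le hj (min_le_right _ _)
    simpa using hlt j hjl hjk
  have h2 : (xs.drop k).countP (fun y => decide (y < a)) = 0 := by
    rw [List.countP_eq_zero]
    intro y hy
    rcases List.mem_drop_iff_getElem.mp hy with ⟨j, hj, rfl⟩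
    have := hge (k + j) (by omega) (Nat.le_add_right _ _)
    simp
    omega
  rw [hsplit, h1, h2, List.length_take]
  omega

theorem pv_take_filter (l : List (Int × Int)) (a : Int) (hp : l.Pairwise (fun p q => p.1 ≤ q.1)) :
    l.take (l.countP (fun p => decide (p.1 < a))) = l.filter (fun p => decide (p.1 < a)) := by
  induction l with
  | nil => simp
  | cons p t ih =>
      have hpt := List.pairwise_cons.mp hp
      by_cases h : p.1 < a
      · simp [h, List.take_succ_cons, ih hpt.2]
      · have hz : t.countP (fun q => decide (q.1 < a)) = 0 :=
          List.countP_eq_zero.mpr (fun q hq => by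
            simp only [decide_eq_true_eq]
            have := hpt.1 q hq
            omega)
      
        have hz2 : t.filter (fun q => decide (q.1 < a)) = [] :=
          List.filter_eq_nil_iff.mpr (fun q hq => by
            simp only [decide_eq_true_eq]
            have := hpt.1 q hq
            omega)
        simp [h, hz, hz2]

def pvPref (t : Int) : List (Int × Int) → List Int
  | [] => []
  | kv :: l => (t + kv.2) :: pvPref (t + kv.2) l

theorem pv_pfold (l : List (Int × Int)) : ∀ (acc : List Int) (t : Int),
    (l.foldl (fun (pt : List Int × Int) kv => (pt.1 ++ [pt.2 + kv.2], pt.2 + kv.2)) (acc, t)).1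
      = acc ++ pvPref t l := by
  induction l with
  | nil => intro acc t; simp [pvPref]
  | cons kv l ih =>
      intro acc t
      rw [List.foldl_cons, ih]
      simp [pvPref]

theorem pv_pidx (l : List (Int × Int)) : ∀ (t : Int) (j : Nat), j ≤ l.length →
    (t :: pvPref t l).getD j 0 = t + ((l.take j).map (fun kv => kv.2)).sum := by
  induction l with
  | nil =>
      intro t j hj
      have : j = 0 := by simpa using hj
      subst this
      simp
  | cons kv l ih =>
      intro t j hj
      cases j with
      | zero => simp
      | succ j =>
          have : (t :: pvPref t (kv :: l)).getD (j+1) 0 = ((t + kv.2) :: pvPref (t + kv.2) l).getD j 0 := by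
            simp [pvPref]
          rw [this, ih (t + kv.2) j (by simpa using hj)]
          simp [List.take_succ_cons]
          ring
theorem pv_count_flat (ys l : List Int) (v : Int) :
    (ys.flatMap (fun y => l.map (fun f => y + f))).count v = (ys.map (fun y => l.count (v - y))).sum := by
  induction ys with
  | nil => simp
  | cons y t ih => simp [List.flatMap_cons, List.count_append, pv_count_map_add, ih]

def pvRel (h : PySem.Dict Int Int) (ys : List Int) : Prop :=
  h.keys.Nodup ∧ (∀ v, h.getD v 0 = (ys.count v : Int)) ∧ (∀ v, v ∈ h.keys ↔ v ∈ ys)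

theorem pvRel_h0 : pvRel (PySem.Dict.empty.insert 0 1) [0] := by
  refine ⟨by decide, ?_, fun v => by rw [show (PySem.Dict.empty.insert (0:Int) (1:Int)).keys = [0] from rfl]⟩
  intro v
  rw [PySem.Dict.getD_insert]
  by_cases h : v = 0
  · simp [h]
  · simp [h, Ne.symm h]

theorem pvRel_conv (h : PySem.Dict Int Int) (ys : List Int) (faces : List Int) (hr : pvRel h ys) :
    pvRel (pvConv h faces) (ys.flatMap (fun y => faces.map (fun f => y + f))) := by
  obtain ⟨hnd, hcnt, hmem⟩ := hr
  have hkeys := pv_keys_conv h faces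
  have hitems : h.items = h.keys.map (fun k => (k, h.getD k 0)) := PySem.Dict.items_eq_map_keys h hnd 0
  refine ⟨?_, ?_, ?_⟩
  · rw [hkeys]; exact PySem.Set.nodup_ofList _
  · intro v
    rw [pv_getD_conv, hitems, List.map_map]
    have hm : (h.keys.map ((fun p : Int × Int => p.2 * ((faces.count (v - p.1) : Nat) : Int)) ∘ (fun k => (k, h.getD k 0))))
        = h.keys.map (fun k => (ys.count k : Int) * (faces.count (v - k) : Int)) := by
      apply List.map_congr_left
      intro k _
      simp [hcnt k]
    rw [hm, pv_wsum h.keys ys (fun k => (faces.count (v - k) : Int)) hnd (fun y hy => (hmem y).mpr hy),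
      pv_count_flat ys faces v]
    push_cast
    rw [List.map_map]
    rfl
  · intro v
    rw [hkeys, PySem.Set.mem_ofList]
    constructor
    · intro hv
      rcases List.mem_flatMap.mp hv with ⟨p, hp, hv2⟩
      rcases List.mem_map.mp hv2 with ⟨f, hf, rfl⟩
      refine List.mem_flatMap.mpr ⟨p.1, ?_, List.mem_map.mpr ⟨f, hf, rfl⟩⟩
      rw [hitems] at hp
      rcases List.mem_map.mp hp with ⟨k, hk, hkp⟩
      have : p.1 = k := by rw [← hkp]
      rw [this]
      exact (hmem k).mp hk
    · intro hv
      rcases List.mem_flatMap.mp hv with ⟨y, hy, hv2⟩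
      rcases List.mem_map.mp hv2 with ⟨f, hf, rfl⟩
      have hyk : y ∈ h.keys := (hmem y).mpr hy
      refine List.mem_flatMap.mpr ⟨(y, h.getD y 0), ?_, List.mem_map.mpr ⟨f, hf, rfl⟩⟩
      rw [hitems]
      exact List.mem_map.mpr ⟨y, hyk, rfl⟩

theorem pvRel_fold : ∀ (ls : List (List Int)) (h : PySem.Dict Int Int) (ys : List Int),
    pvRel h ys → pvRel (ls.foldl pvConv h) (pvIter ys ls) := by
  intro ls
  induction ls with
  | nil => intro h ys hr; simpa [pvIter] using hr
  | cons l t ih =>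
      intro h ys hr
      have := ih (pvConv h l) (ys.flatMap (fun y => l.map (fun f => y + f))) (pvRel_conv h ys l hr)
      simpa [pvIter] using this

-- the final histogram facts
theorem pv_hist (ls : List (List Int)) :
    (ls.foldl pvConv (PySem.Dict.empty.insert 0 1)).keys.Nodup
    ∧ (∀ v, (ls.foldl pvConv (PySem.Dict.empty.insert 0 1)).getD v 0
        = (((pvProd ls).map (fun c => c.sum)).count v : Int))
    ∧ (∀ v, v ∈ (ls.foldl pvConv (PySem.Dict.empty.insert 0 1)).keys
        ↔ v ∈ (pvProd ls).map (fun c => c.sum)) := by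
  obtain ⟨hnd, hcnt, hmem⟩ := pvRel_fold ls (PySem.Dict.empty.insert 0 1) [0] pvRel_h0
  have hc : ∀ v, (pvIter [0] ls).count v = ((pvProd ls).map (fun c => c.sum)).count v := by
    intro v
    rw [pv_iter_count]
    simp
  refine ⟨hnd, fun v => by rw [hcnt v, hc v], fun v => ?_⟩
  rw [hmem v]
  constructor
  · intro hv
    have := List.count_pos_iff.mpr hv
    rw [hc v] at this
    exact List.count_pos_iff.mp this
  · intro hv
    have := List.count_pos_iff.mpr hv
    rw [← hc v] at this
    exact List.count_pos_iff.mp this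


theorem pv_lookup (lb : List (List Int)) (x : Int) :
    PySem.List.pyGetD
      ((PySem.List.sorted (lb.foldl pvConv (PySem.Dict.empty.insert 0 1)).items (fun kv => kv.1) false).foldl
          (fun (pt : List Int × Int) kv => (pt.1 ++ [pt.2 + kv.2], pt.2 + kv.2)) ([0], 0)).1
      ((PySem.List.bisectLeft ((PySem.List.sorted (lb.foldl pvConv (PySem.Dict.empty.insert 0 1)).items (fun kv => kv.1) false).map (fun kv => kv.1)) x : Nat) : Int) 0
    = ((((pvProd lb).map (fun c => c.sum)).countP (fun y => decide (y < x)) : Nat) : Int) := by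
  obtain ⟨hndB, hcntB, hmemB⟩ := pv_hist lb
  set SB := (pvProd lb).map (fun c => c.sum) with hSB
  set hb := lb.foldl pvConv (PySem.Dict.empty.insert 0 1) with hhb
  set itemsB := PySem.List.sorted hb.items (fun kv => kv.1) false with hitemsB
  set keysB := itemsB.map (fun kv => kv.1) with hkeysB
  have hpairItems : itemsB.Pairwise (fun p q => p.1 ≤ q.1) := PySem.List.sorted_pairwise hb.items (fun kv => kv.1)
  have hpairKeys : keysB.Pairwise (· ≤ ·) := PySem.List.sorted_map_key_pairwise hb.items (fun kv => kv.1)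
  have hb1 : PySem.List.bisectLeft keysB x = itemsB.countP (fun p => decide (p.1 < x)) := by
    rw [pv_bisect_countP keysB x hpairKeys, hkeysB, List.countP_map]
    rfl
  have hpr : ((itemsB.foldl (fun (pt : List Int × Int) kv => (pt.1 ++ [pt.2 + kv.2], pt.2 + kv.2)) ([0], 0)).1)
      = 0 :: pvPref 0 itemsB := by
    rw [pv_pfold itemsB [0] 0]
    rfl
  rw [PySem.List.pyGetD_natCast, hpr, hb1]
  rw [pv_pidx itemsB 0 (itemsB.countP (fun p => decide (p.1 < x))) List.countP_le_length, zero_add,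
    pv_take_filter itemsB x hpairItems]
  have hperm := ((PySem.List.sorted_perm hb.items (fun kv => kv.1) false).filter
      (fun p => decide (p.1 < x))).map (fun kv => kv.2)
  rw [hperm.sum_eq]
  rw [PySem.Dict.items_eq_map_keys hb hndB 0, List.filter_map, List.map_map]
  have hmc : (hb.keys.filter ((fun p => decide (p.1 < x)) ∘ (fun k => (k, hb.getD k 0)))).map
        ((fun kv : Int × Int => kv.2) ∘ (fun k => (k, hb.getD k 0)))
      = (hb.keys.filter (fun k => decide (k < x))).map (fun k => ((SB.filter (fun y => decide (y < x))).count k : Int) * 1) := by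
    have : (hb.keys.filter ((fun p : Int × Int => decide (p.1 < x)) ∘ (fun k => (k, hb.getD k 0))))
        = hb.keys.filter (fun k => decide (k < x)) := by rfl
    rw [this]
    apply List.map_congr_left
    intro k hk
    have hklt : k < x := by simpa using (List.mem_filter.mp hk).2
    have : (SB.filter (fun y => decide (y < x))).count k = SB.count k := List.count_filter (by simpa using hklt)
    simp only [Function.comp, this, mul_one]
    exact hcntB k
  rw [hmc, pv_wsum (hb.keys.filter (fun k => decide (k < x))) (SB.filter (fun y => decide (y < x)))
      (fun _ => 1) (hndB.filter _)
      (fun y hy => List.mem_filter.mpr ⟨(hmemB y).mpr (List.mem_filter.mp hy).1, (List.mem_filter.mp hy).2⟩)]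
  simp [List.countP_eq_length_filter]

theorem pv_cnt_eq (la lb : List (List Int)) :
    (la.foldl pvConv (PySem.Dict.empty.insert 0 1)).items.foldl
      (fun c kv => c + kv.2 * PySem.List.pyGetD
        ((PySem.List.sorted (lb.foldl pvConv (PySem.Dict.empty.insert 0 1)).items (fun kv => kv.1) false).foldl
            (fun (pt : List Int × Int) kv => (pt.1 ++ [pt.2 + kv.2], pt.2 + kv.2)) ([0], 0)).1
        ((PySem.List.bisectLeft ((PySem.List.sorted (lb.foldl pvConv (PySem.Dict.empty.insert 0 1)).items (fun kv => kv.1) false).map (fun kv => kv.1)) kv.1 : Nat) : Int) 0) 0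
    = ((pvProd la).map (fun c => c.sum)).foldl
        (fun c a => c + ((PySem.List.bisectLeft (PySem.List.sorted ((pvProd lb).map (fun c => c.sum)) (fun x => x) false) a : Nat) : Int)) 0 := by
  obtain ⟨hndA, hcntA, hmemA⟩ := pv_hist la
  set SA := (pvProd la).map (fun c => c.sum) with hSA
  set SB := (pvProd lb).map (fun c => c.sum) with hSB
  set ha := la.foldl pvConv (PySem.Dict.empty.insert 0 1) with hha
  rw [PySem.List.foldl_add ha.items
      (fun kv => kv.2 * PySem.List.pyGetD
        ((PySem.List.sorted (lb.foldl pvConv (PySem.Dict.empty.insert 0 1)).items (fun kv => kv.1) false).foldl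
            (fun (pt : List Int × Int) kv => (pt.1 ++ [pt.2 + kv.2], pt.2 + kv.2)) ([0], 0)).1
        ((PySem.List.bisectLeft ((PySem.List.sorted (lb.foldl pvConv (PySem.Dict.empty.insert 0 1)).items (fun kv => kv.1) false).map (fun kv => kv.1)) kv.1 : Nat) : Int) 0) 0,
    PySem.List.foldl_add SA
      (fun a => ((PySem.List.bisectLeft (PySem.List.sorted SB (fun x => x) false) a : Nat) : Int)) 0]
  have hL : (ha.items.map (fun kv => kv.2 * PySem.List.pyGetD
        ((PySem.List.sorted (lb.foldl pvConv (PySem.Dict.empty.insert 0 1)).items (fun kv => kv.1) false).foldl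
            (fun (pt : List Int × Int) kv => (pt.1 ++ [pt.2 + kv.2], pt.2 + kv.2)) ([0], 0)).1
        ((PySem.List.bisectLeft ((PySem.List.sorted (lb.foldl pvConv (PySem.Dict.empty.insert 0 1)).items (fun kv => kv.1) false).map (fun kv => kv.1)) kv.1 : Nat) : Int) 0))
      = ha.items.map (fun kv => kv.2 * ((SB.countP (fun y => decide (y < kv.1)) : Nat) : Int)) := by
    apply List.map_congr_left
    intro kv _
    rw [pv_lookup lb kv.1]
  rw [hL, PySem.Dict.items_eq_map_keys ha hndA 0, List.map_map]
  have hmc : (ha.keys.map ((fun kv : Int × Int => kv.2 * ((SB.countP (fun y => decide (y < kv.1)) : Nat) : Int)) ∘ (fun k => (k, ha.getD k 0))))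
      = ha.keys.map (fun k => (SA.count k : Int) * ((SB.countP (fun y => decide (y < k)) : Nat) : Int)) := by
    apply List.map_congr_left
    intro k _
    simp only [Function.comp]
    rw [hcntA k]
  rw [hmc, pv_wsum ha.keys SA (fun k => ((SB.countP (fun y => decide (y < k)) : Nat) : Int)) hndA
      (fun y hy => (hmemA y).mpr hy)]
  apply congrArg
  apply congrArg
  apply List.map_congr_left
  intro a _
  rw [pv_bisect_countP (PySem.List.sorted SB (fun x => x) false) a
      (PySem.List.sorted_pairwise SB (fun x => x)),
    (PySem.List.sorted_perm SB (fun x => x) false).countP_eq]theorem pv_dispatch (l : List Int) (sel : PySem.Set Int) (f : Int → List Int) :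
    ∀ (a b : PySem.Dict Int Int),
    (l.foldl (fun (hab : PySem.Dict Int Int × PySem.Dict Int Int) i =>
        if PySem.Set.contains sel i then (pvConv hab.1 (f i), hab.2) else (hab.1, pvConv hab.2 (f i))) (a, b))
    = (((l.filter (fun i => PySem.Set.contains sel i)).map f).foldl pvConv a,
       ((l.filter (fun i => !PySem.Set.contains sel i)).map f).foldl pvConv b) := by
  induction l with
  | nil => intro a b; simp
  | cons i t ih =>
      intro a b
      by_cases h : PySem.Set.contains sel i
      · rw [List.foldl_cons, if_pos h, ih, List.filter_cons, List.filter_cons,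
          if_pos h, if_neg (by rw [h]; decide : ¬ ((!PySem.Set.contains sel i) = true)),
          List.map_cons, List.foldl_cons]
      · have h2 : PySem.Set.contains sel i = false := by simpa using h
        rw [List.foldl_cons, if_neg h, ih, List.filter_cons, List.filter_cons,
          if_neg h, if_pos (by rw [h2]; decide : (!PySem.Set.contains sel i) = true),
          List.map_cons, List.foldl_cons]

theorem filter_mem_sublist (s l : List Int) (hs : s.Sublist l) (hl : l.Nodup) : l.filter (fun x => decide (x ∈ s)) = s := by
  induction hs with
  | slnil => simp
  | @cons l' s' x h ih =>
      have hx : x ∉ l' := fun hm => (List.nodup_cons.mp hl).1 (h.subset hm)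
      rw [List.filter_cons, if_neg (by simpa using hx), ih (List.nodup_cons.mp hl).2]
  | @cons₂ l' s' x h ih =>
      have hnd := List.nodup_cons.mp hl
      have heq : List.filter (fun y => decide (y ∈ x :: l')) s' = List.filter (fun y => decide (y ∈ l')) s' := by
        apply List.filter_congr
        intro y hy
        have hne : y ≠ x := fun hyx => hnd.1 (hyx ▸ hy)
        simp [List.mem_cons, hne]
      rw [List.filter_cons, if_pos (by simp), heq, ih hnd.2]

-- per-candidate equality of the two win-counts
theorem pv_cnt_candi (dice : List (List Int)) (candi : List Int)
    (hmem : candi ∈ PySem.List.combinations (PySem.List.pyRange 0 (PySem.List.len dice) 1)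
      (PySem.Int.floordiv (PySem.List.len dice) 2).toNat) :
    (((PySem.List.pyRange 0 (PySem.List.len dice) 1).foldl
        (fun (hab : PySem.Dict Int Int × PySem.Dict Int Int) i =>
          if PySem.Set.contains (PySem.Set.ofList candi) i
          then (pvConv hab.1 (PySem.List.pyGetD dice i []), hab.2)
          else (hab.1, pvConv hab.2 (PySem.List.pyGetD dice i [])))
        (PySem.Dict.empty.insert 0 1, PySem.Dict.empty.insert 0 1)).1).items.foldl
      (fun c kv => c + kv.2 * PySem.List.pyGetD
        ((PySem.List.sorted (((PySem.List.pyRange 0 (PySem.List.len dice) 1).foldl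
            (fun (hab : PySem.Dict Int Int × PySem.Dict Int Int) i =>
              if PySem.Set.contains (PySem.Set.ofList candi) i
              then (pvConv hab.1 (PySem.List.pyGetD dice i []), hab.2)
              else (hab.1, pvConv hab.2 (PySem.List.pyGetD dice i [])))
            (PySem.Dict.empty.insert 0 1, PySem.Dict.empty.insert 0 1)).2).items (fun kv => kv.1) false).foldl
            (fun (pt : List Int × Int) kv => (pt.1 ++ [pt.2 + kv.2], pt.2 + kv.2)) ([0], 0)).1
        ((PySem.List.bisectLeft ((PySem.List.sorted (((PySem.List.pyRange 0 (PySem.List.len dice) 1).foldl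
            (fun (hab : PySem.Dict Int Int × PySem.Dict Int Int) i =>
              if PySem.Set.contains (PySem.Set.ofList candi) i
              then (pvConv hab.1 (PySem.List.pyGetD dice i []), hab.2)
              else (hab.1, pvConv hab.2 (PySem.List.pyGetD dice i [])))
            (PySem.Dict.empty.insert 0 1, PySem.Dict.empty.insert 0 1)).2).items (fun kv => kv.1) false).map (fun kv => kv.1)) kv.1 : Nat) : Int) 0) 0
    = ((pvProd (candi.map (fun i => PySem.List.pyGetD dice i []))).map (fun c => c.sum)).foldl
        (fun c a => c + ((PySem.List.bisectLeft (PySem.List.sorted ((pvProd (((PySem.List.pyRange 0 (PySem.List.len dice) 1).filter (fun b => !(candi.contains b))).map (fun i => PySem.List.pyGetD dice i []))).map (fun c => c.sum)) (fun x => x) false) a : Nat) : Int)) 0 := by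
  have hsub : candi.Sublist (PySem.List.pyRange 0 (PySem.List.len dice) 1) :=
    ((PySem.List.mem_combinations_iff _ _ _).mp hmem).1
  have hnd : candi.Nodup := hsub.nodup (PySem.List.nodup_pyRange_one _ _)
  have hof : PySem.Set.ofList candi = candi := PySem.Set.ofList_eq_self_of_nodup candi hnd
  have hd := pv_dispatch (PySem.List.pyRange 0 (PySem.List.len dice) 1) (PySem.Set.ofList candi)
    (fun i => PySem.List.pyGetD dice i []) (PySem.Dict.empty.insert 0 1) (PySem.Dict.empty.insert 0 1)
  rw [hd]
  have hsel : ((PySem.List.pyRange 0 (PySem.List.len dice) 1).filter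
      (fun i => PySem.Set.contains (PySem.Set.ofList candi) i)) = candi := by
    have hcongr : ((PySem.List.pyRange 0 (PySem.List.len dice) 1).filter
        (fun i => PySem.Set.contains (PySem.Set.ofList candi) i))
        = (PySem.List.pyRange 0 (PySem.List.len dice) 1).filter (fun i => decide (i ∈ candi)) := by
      apply List.filter_congr
      intro i _
      rw [hof]
      by_cases h : i ∈ candi
      · simp [h]
      · simp [h]
    rw [hcongr]
    exact filter_mem_sublist candi _ hsub (PySem.List.nodup_pyRange_one _ _)
  have hunsel : ((PySem.List.pyRange 0 (PySem.List.len dice) 1).filter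
      (fun i => !PySem.Set.contains (PySem.Set.ofList candi) i))
      = (PySem.List.pyRange 0 (PySem.List.len dice) 1).filter (fun b => !(candi.contains b)) := by
    apply List.filter_congr
    intro i _
    rw [hof]
    simp
  rw [hsel, hunsel]
  exact pv_cnt_eq (candi.map (fun i => PySem.List.pyGetD dice i []))
    (((PySem.List.pyRange 0 (PySem.List.len dice) 1).filter (fun b => !(candi.contains b))).map
      (fun i => PySem.List.pyGetD dice i []))

-- ===== VERDICT (by name: the statement is the Claim_ definition above) =====
theorem solution_spec : Claim_equal_solution := by
  unfold Claim_equal_solution Spec_solution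
  intro dice _
  suffices h : (PySem.List.combinations (PySem.List.pyRange 0 (PySem.List.len dice) 1)
        (PySem.Int.floordiv (PySem.List.len dice) 2).toNat).foldl
      (fun (st : List Int × Int) candi =>
        if st.2 < ((pvProd (candi.map (fun i => PySem.List.pyGetD dice i []))).map (fun c => c.sum)).foldl
            (fun c a => c + ((PySem.List.bisectLeft (PySem.List.sorted ((pvProd (((PySem.List.pyRange 0 (PySem.List.len dice) 1).filter (fun b => !(candi.contains b))).map (fun i => PySem.List.pyGetD dice i []))).map (fun c => c.sum)) (fun x => x) false) a : Nat) : Int)) 0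
        then (candi.map (fun a => a + 1),
          ((pvProd (candi.map (fun i => PySem.List.pyGetD dice i []))).map (fun c => c.sum)).foldl
            (fun c a => c + ((PySem.List.bisectLeft (PySem.List.sorted ((pvProd (((PySem.List.pyRange 0 (PySem.List.len dice) 1).filter (fun b => !(candi.contains b))).map (fun i => PySem.List.pyGetD dice i []))).map (fun c => c.sum)) (fun x => x) false) a : Nat) : Int)) 0)
        else st) ([], 0)
      = (PySem.List.combinations (PySem.List.pyRange 0 (PySem.List.len dice) 1)
        (PySem.Int.floordiv (PySem.List.len dice) 2).toNat).foldl
      (fun (st : List Int × Int) candi =>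
        if st.2 < (((PySem.List.pyRange 0 (PySem.List.len dice) 1).foldl
            (fun (hab : PySem.Dict Int Int × PySem.Dict Int Int) i =>
              if PySem.Set.contains (PySem.Set.ofList candi) i
              then (pvConv hab.1 (PySem.List.pyGetD dice i []), hab.2)
              else (hab.1, pvConv hab.2 (PySem.List.pyGetD dice i [])))
            (PySem.Dict.empty.insert 0 1, PySem.Dict.empty.insert 0 1)).1).items.foldl
          (fun c kv => c + kv.2 * PySem.List.pyGetD
            ((PySem.List.sorted (((PySem.List.pyRange 0 (PySem.List.len dice) 1).foldl
                (fun (hab : PySem.Dict Int Int × PySem.Dict Int Int) i =>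
                  if PySem.Set.contains (PySem.Set.ofList candi) i
                  then (pvConv hab.1 (PySem.List.pyGetD dice i []), hab.2)
                  else (hab.1, pvConv hab.2 (PySem.List.pyGetD dice i [])))
                (PySem.Dict.empty.insert 0 1, PySem.Dict.empty.insert 0 1)).2).items (fun kv => kv.1) false).foldl
                (fun (pt : List Int × Int) kv => (pt.1 ++ [pt.2 + kv.2], pt.2 + kv.2)) ([0], 0)).1
            ((PySem.List.bisectLeft ((PySem.List.sorted (((PySem.List.pyRange 0 (PySem.List.len dice) 1).foldl
                (fun (hab : PySem.Dict Int Int × PySem.Dict Int Int) i =>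
                  if PySem.Set.contains (PySem.Set.ofList candi) i
                  then (pvConv hab.1 (PySem.List.pyGetD dice i []), hab.2)
                  else (hab.1, pvConv hab.2 (PySem.List.pyGetD dice i [])))
                (PySem.Dict.empty.insert 0 1, PySem.Dict.empty.insert 0 1)).2).items (fun kv => kv.1) false).map (fun kv => kv.1)) kv.1 : Nat) : Int) 0) 0
        then (candi.map (fun i => i + 1),
          (((PySem.List.pyRange 0 (PySem.List.len dice) 1).foldl
            (fun (hab : PySem.Dict Int Int × PySem.Dict Int Int) i =>
              if PySem.Set.contains (PySem.Set.ofList candi) i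
              then (pvConv hab.1 (PySem.List.pyGetD dice i []), hab.2)
              else (hab.1, pvConv hab.2 (PySem.List.pyGetD dice i [])))
            (PySem.Dict.empty.insert 0 1, PySem.Dict.empty.insert 0 1)).1).items.foldl
          (fun c kv => c + kv.2 * PySem.List.pyGetD
            ((PySem.List.sorted (((PySem.List.pyRange 0 (PySem.List.len dice) 1).foldl
                (fun (hab : PySem.Dict Int Int × PySem.Dict Int Int) i =>
                  if PySem.Set.contains (PySem.Set.ofList candi) i
                  then (pvConv hab.1 (PySem.List.pyGetD dice i []), hab.2)
                  else (hab.1, pvConv hab.2 (PySem.List.pyGetD dice i [])))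
                (PySem.Dict.empty.insert 0 1, PySem.Dict.empty.insert 0 1)).2).items (fun kv => kv.1) false).foldl
                (fun (pt : List Int × Int) kv => (pt.1 ++ [pt.2 + kv.2], pt.2 + kv.2)) ([0], 0)).1
            ((PySem.List.bisectLeft ((PySem.List.sorted (((PySem.List.pyRange 0 (PySem.List.len dice) 1).foldl
                (fun (hab : PySem.Dict Int Int × PySem.Dict Int Int) i =>
                  if PySem.Set.contains (PySem.Set.ofList candi) i
                  then (pvConv hab.1 (PySem.List.pyGetD dice i []), hab.2)
                  else (hab.1, pvConv hab.2 (PySem.List.pyGetD dice i [])))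
                (PySem.Dict.empty.insert 0 1, PySem.Dict.empty.insert 0 1)).2).items (fun kv => kv.1) false).map (fun kv => kv.1)) kv.1 : Nat) : Int) 0) 0)
        else st) ([], 0) by
    exact congrArg Prod.fst h
  apply PySem.List.foldl_congr_mem
  intro acc candi hc
  have hcnt := pv_cnt_candi dice candi hc
  rw [hcnt]
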